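-- pv_equiv track=rewrite | github.com/CompEpigen/methylbert | src/methylbert/data/bam.py | parse_cigar
-- ===== SOURCE A (Python) =====
-- def parse_cigar(cigar: str):
-- 	num = 0
-- 	cigar_char = list()
-- 	cigar_num = list()
-- 	cigar = list(cigar)
--
-- 	for c in cigar:
-- 		if c.isdigit() :
-- 			num = num*10 + int(c)
-- 		else:
-- 			cigar_char.append(c)
-- 			cigar_num.append(num)
-- 			num = 0
-- 	return cigar_char, cigar_num
-- ===== SOURCE B (Python) =====
-- from itertools import groupby
--
-- def parse_cigar(cigar: str):
--     cigar_char = []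
--     cigar_num = []
--     num = 0
--     for is_digit, group in groupby(cigar, key=str.isdigit):
--         if is_digit:
--             num = int(''.join(group))
--         else:
--             for ch in group:
--                 cigar_char.append(ch)
--                 cigar_num.append(num)
--                 num = 0
--     return cigar_char, cigar_num
-- ===== Notes on version B (the rewrite author's own statement) =====
-- stated objective: idiomatic
-- what changed: Replaces the per-character accumulator loop with itertools.groupby(cigar, key=str.isdigit): digit runs are converted to an int in one step and non-digit runs are emitted per character, instead of threading a running num through every character.
import Mathlib
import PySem

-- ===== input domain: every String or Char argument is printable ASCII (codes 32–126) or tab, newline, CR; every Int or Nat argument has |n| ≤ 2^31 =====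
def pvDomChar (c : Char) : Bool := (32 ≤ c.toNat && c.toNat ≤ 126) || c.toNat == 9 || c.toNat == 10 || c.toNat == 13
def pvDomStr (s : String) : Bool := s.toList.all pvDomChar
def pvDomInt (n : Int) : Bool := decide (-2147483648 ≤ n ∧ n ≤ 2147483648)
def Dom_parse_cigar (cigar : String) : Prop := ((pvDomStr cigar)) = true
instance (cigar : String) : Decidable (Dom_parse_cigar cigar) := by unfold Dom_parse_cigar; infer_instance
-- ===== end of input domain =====

-- B replaces A's per-character accumulator loop with a run-based decomposition (itertools.groupby
-- on isdigit): idiomatic, same cost; return value proved equal on the whole domain.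

-- ===== PORT A =====
-- A's single loop: state (num, cigar_char, cigar_num), one step per character.
def parse_cigar (cigar : String) : List String × List Int :=
  let r := cigar.toList.foldl
    (fun (st : Int × List String × List Int) (c : Char) =>
      if c.isDigit then (st.1 * 10 + ((c.toNat : Int) - 48), st.2.1, st.2.2)
      else (0, st.2.1 ++ [c.toString], st.2.2 ++ [st.1]))
    (0, [], [])
  (r.2.1, r.2.2)

-- ===== PORT B =====
-- itertools.groupby(cigar, key=str.isdigit): maximal runs of equal isdigit-ness.
def pcRuns (l : List Char) : List (Bool × List Char) :=
  match l with
  | [] => []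
  | c :: cs =>
    (c.isDigit, c :: cs.takeWhile (fun x => x.isDigit == c.isDigit))
      :: pcRuns (cs.dropWhile (fun x => x.isDigit == c.isDigit))
termination_by l.length
decreasing_by
  simp only [List.length_cons]
  exact Nat.lt_succ_of_le (List.length_dropWhile_le _ _)

-- B's inner loop over a non-digit group: append current num, then 0 for the rest.
def pcNums : Int → List Char → List Int
  | _, [] => []
  | num, _ :: g => num :: pcNums 0 g

-- B's loop over the groups.
def pcGroups : List (Bool × List Char) → Int → List String × List Int
  | [], _ => ([], [])
  | (k, g) :: gs, num =>
    if k then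
      pcGroups gs (g.foldl (fun n c => n * 10 + ((c.toNat : Int) - 48)) 0)  -- int(''.join(group))
    else
      let r := pcGroups gs 0
      (g.map Char.toString ++ r.1, pcNums num g ++ r.2)

def parse_cigar_alt (cigar : String) : List String × List Int :=
  pcGroups (pcRuns cigar.toList) 0

-- ===== PRECONDITION & SPEC =====
def Spec_parse_cigar (cigar : String) (out : List String × List Int) : Prop := out = parse_cigar_alt cigar
instance (cigar : String) (out : List String × List Int) : Decidable (Spec_parse_cigar cigar out) := by unfold Spec_parse_cigar; infer_instance

-- ===== CLAIM (what is proved, stated in full; the proofs are below) =====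
def Claim_equal_parse_cigar : Prop := ∀ (cigar : String), Dom_parse_cigar cigar → Spec_parse_cigar cigar (parse_cigar cigar)

-- ===== LEMMAS AND PROOFS =====

-- Reference recursion for A's loop: final num, chars produced, nums produced.
def pcSpec : List Char → Int → Int × List String × List Int
  | [], num => (num, [], [])
  | c :: cs, num =>
    if c.isDigit then pcSpec cs (num * 10 + ((c.toNat : Int) - 48))
    else
      let r := pcSpec cs 0
      (r.1, c.toString :: r.2.1, num :: r.2.2)

theorem pcSpec_foldl (l : List Char) (num : Int) (cc : List String) (cn : List Int) :
    l.foldl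
      (fun (st : Int × List String × List Int) (c : Char) =>
        if c.isDigit then (st.1 * 10 + ((c.toNat : Int) - 48), st.2.1, st.2.2)
        else (0, st.2.1 ++ [c.toString], st.2.2 ++ [st.1]))
      (num, cc, cn)
    = ((pcSpec l num).1, cc ++ (pcSpec l num).2.1, cn ++ (pcSpec l num).2.2) := by
  induction l generalizing num cc cn with
  | nil => simp [pcSpec]
  | cons c cs ih =>
    by_cases h : c.isDigit
    · simp only [List.foldl_cons, pcSpec, h, if_pos]
      exact ih _ _ _
    · simp only [List.foldl_cons, pcSpec, h, Bool.false_eq_true, if_false]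
      rw [ih]
      simp

-- pcSpec over a run of digits: just accumulates the number.
theorem pcSpec_digit_run (g rest : List Char) (num : Int)
    (hg : ∀ c ∈ g, c.isDigit = true) :
    pcSpec (g ++ rest) num
      = pcSpec rest (g.foldl (fun n c => n * 10 + ((c.toNat : Int) - 48)) num) := by
  induction g generalizing num with
  | nil => simp
  | cons c cs ih =>
    have hc : c.isDigit = true := hg c (by simp)
    simp only [List.cons_append, pcSpec, hc, if_pos, List.foldl_cons]
    exact ih _ (fun x hx => hg x (by simp [hx]))

-- One non-digit step of pcSpec.
theorem pcSpec_cons_nondigit (c : Char) (cs : List Char) (num : Int) (hc : c.isDigit = false) :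
    pcSpec (c :: cs) num
      = ((pcSpec cs 0).1, c.toString :: (pcSpec cs 0).2.1, num :: (pcSpec cs 0).2.2) := by
  simp [pcSpec, hc]

-- pcSpec over a run of non-digits (nonempty): emits each char, num then zeros.
theorem pcSpec_nondigit_run (c : Char) (g rest : List Char) (num : Int)
    (hc : c.isDigit = false) (hg : ∀ x ∈ g, x.isDigit = false) :
    pcSpec ((c :: g) ++ rest) num
      = ((pcSpec rest 0).1,
         (c :: g).map Char.toString ++ (pcSpec rest 0).2.1,
         pcNums num (c :: g) ++ (pcSpec rest 0).2.2) := by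
  induction g generalizing c num with
  | nil => simp [pcSpec_cons_nondigit _ _ _ hc, pcNums]
  | cons x xs ih =>
    have hx : x.isDigit = false := hg x (by simp)
    have h2 : ∀ y ∈ xs, y.isDigit = false := fun y hy => hg y (by simp [hy])
    rw [List.cons_append, pcSpec_cons_nondigit _ _ _ hc, ih x 0 hx h2]
    simp [pcNums]

-- Digit-run accumulation from a zero start equals B's int(run) (trivially, same fold).
-- Main bridge: B's group loop equals pcSpec's output, provided num is 0 whenever the
-- remaining input starts with a digit (which A's loop guarantees: num resets on each
-- non-digit, and digit runs are maximal).
theorem pcGroups_spec (l : List Char) (num : Int)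
    (h : ∀ c, l.head? = some c → c.isDigit = true → num = 0) :
    pcGroups (pcRuns l) num = (pcSpec l num).2 := by
  induction hn : l.length using Nat.strong_induction_on generalizing l num with
  | _ n ih =>
    match l with
    | [] => simp [pcRuns, pcGroups, pcSpec]
    | c :: cs =>
      have hsplit : cs.takeWhile (fun x => x.isDigit == c.isDigit)
          ++ cs.dropWhile (fun x => x.isDigit == c.isDigit) = cs :=
        List.takeWhile_append_dropWhile
      have htake : ∀ x ∈ cs.takeWhile (fun x => x.isDigit == c.isDigit),
          x.isDigit = c.isDigit := by
        intro x hx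
        simpa using List.mem_takeWhile_imp hx
      have hdroplen : (cs.dropWhile (fun x => x.isDigit == c.isDigit)).length < n := by
    -- dropWhile is no longer than cs
        have := List.length_dropWhile_le (fun x => x.isDigit == c.isDigit) cs
        simp only [List.length_cons] at hn
        omega
      have hdrophead : ∀ x, (cs.dropWhile (fun x => x.isDigit == c.isDigit)).head? = some x →
          x.isDigit ≠ c.isDigit := by
        intro x hx
        have := List.head?_dropWhile_not (fun x => x.isDigit == c.isDigit) cs
        rw [hx] at this
        simpa using this
      by_cases hc : c.isDigit
      · -- digit run: num = 0 by hypothesis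
        have hnum : num = 0 := h c rfl hc
        simp only [hc] at hsplit htake hdroplen hdrophead
        simp only [pcRuns, pcGroups, hc, if_pos]
        rw [ih _ hdroplen _ _ (by
              intro x hx hxd
              exact absurd hxd (by simpa [hc] using hdrophead x hx)) rfl]
        have hre : pcSpec (c :: cs) num
            = pcSpec ((c :: cs.takeWhile (fun x => x.isDigit == true))
                ++ cs.dropWhile (fun x => x.isDigit == true)) num := by
          rw [List.cons_append, hsplit]
        rw [hre, pcSpec_digit_run _ _ _ (by
              intro x hx
              rcases List.mem_cons.mp hx with h1 | h1
              · exact h1 ▸ hc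
              · exact htake x h1), hnum]
      · -- non-digit run
        have hcf : c.isDigit = false := by simpa using hc
        simp only [hcf] at hsplit htake hdroplen hdrophead
        simp only [pcRuns, pcGroups, hcf, Bool.false_eq_true, if_false]
        rw [ih _ hdroplen _ 0 (by intro _ _ _; rfl) rfl]
        have hre : pcSpec (c :: cs) num
            = pcSpec ((c :: cs.takeWhile (fun x => x.isDigit == false))
                ++ cs.dropWhile (fun x => x.isDigit == false)) num := by
          rw [List.cons_append, hsplit]
        rw [hre, pcSpec_nondigit_run _ _ _ _ hcf htake]

-- ===== VERDICT (by name: the statement is the Claim_ definition above) =====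
theorem parse_cigar_spec : Claim_equal_parse_cigar := by
  intro cigar _
  unfold Spec_parse_cigar parse_cigar parse_cigar_alt
  rw [pcSpec_foldl, pcGroups_spec _ _ (by intro _ _ _; rfl)]
  simp
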